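-- pv_equiv track=rewrite | github.com/kh1iu/RubikCubeSolver | cube_solver.py | _solve
-- ===== SOURCE A (Python) =====
-- MOVES = {
--     "CW_X": [0, 21, 2, 23, 6, 4, 7, 5, 19, 9, 17, 11, 12, 13, 14, 15, 16, 1, 18, 3, 20, 10, 22, 8], # X turn clock-wise
--     "CW_Y": [0, 1, 14, 15, 4, 5, 2, 3, 8, 9, 6, 7, 12, 13, 10, 11, 16, 17, 18, 19, 22, 20, 23, 21], # Y turn clock-wise
--     "CW_Z": [2, 0, 3, 1, 18, 5, 19, 7, 8, 9, 10, 11, 12, 20, 14, 21, 16, 17, 15, 13, 6, 4, 22, 23], # Z turn clock-wise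
--     "CCW_X": [0, 17, 2, 19, 5, 7, 4, 6, 23, 9, 21, 11, 12, 13, 14, 15, 16, 10, 18, 8, 20, 1, 22, 3], # X turn counter clock-wise
--     "CCW_Y": [0, 1, 6, 7, 4, 5, 10, 11, 8, 9, 14, 15, 12, 13, 2, 3, 16, 17, 18, 19, 21, 23, 20, 22], # Y turn counter clock-wise
--     "CCW_Z": [1, 3, 0, 2, 21, 5, 20, 7, 8, 9, 10, 11, 12, 19, 14, 18, 16, 17, 4, 6, 13, 15, 22, 23], # Z turn counter clock-wise
-- }
--
-- def perform_move(state, move):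
--     assert move in MOVES, f"Unrecognized move {move}"
--     # return tuple([state[idx] for idx in MOVES[move]])
--     return ''.join([state[idx] for idx in MOVES[move]])
--
-- def is_solved(state):
--     for i in range(0, 24, 4):
--         if len(set(state[i:i+4])) > 1:
--             return False
--     return True
--
-- def _solve(state,  moves, depth, visited_state):
--     """
--     A method to check if a solved state can be reached from the input state within a given depth.
--
--     ARGUMENT:
--
--     states(str): starting exploration state.
--     moves(List[str]): a list (history) of moves from initial state to the starting exploration state.
--     depth(int): maximum depth to explore.
--     visited_state(Dict[str, int]): all the states (and its depth) visited so far
--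
--     SUMMARY:
--
--     - First check if the starting exploration state is a solved state or not. If yes, then a solution
--     is found and return the moves.
--     - Then we check, and only continue the exploration, if the depth is greater than zero.
--     - [KEY STEP!!] Next, we check if the starting  state is already visited before and if previously
--     visitation has depth greater then the current depth. If so, then can stop the exploration of this
--     starting stage because it means we have already explore the same starting state before and explored
--     with greater depth. If we did not find soulution previously (with greater depth) then we won't find
--     a solution this time with less depth.
--     - We continue the exploration if either we have never seen (explore) the given starting state or
--     we will explore the starting state again but with a greater depth.
--     - We apply all possible moves to the starting state to get the next state, update (add) the moves
--     with the new move and recursively call _solve again with the new state and decresing the depth by 1.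
--     (the application of each possible moves consumes one depth)
--
--     """
--
--     if is_solved(state):
--         return list(moves)
--     if depth <= 0:
--         return
--     if visited_state.get(state, -1) >= depth:
--         return
--     visited_state[state] = depth
--     for move in list(MOVES.keys()):
--         next_state = perform_move(state, move)
--         next_moves = moves + [move]
--         # moves.append(move)
--         result = _solve(next_state, next_moves, depth - 1, visited_state)
--         # moves.pop()
--         if result:
--             return result
--     return
-- ===== SOURCE B (Python) =====
-- CW = {
--     "X": [0, 21, 2, 23, 6, 4, 7, 5, 19, 9, 17, 11, 12, 13, 14, 15, 16, 1, 18, 3, 20, 10, 22, 8],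
--     "Y": [0, 1, 14, 15, 4, 5, 2, 3, 8, 9, 6, 7, 12, 13, 10, 11, 16, 17, 18, 19, 22, 20, 23, 21],
--     "Z": [2, 0, 3, 1, 18, 5, 19, 7, 8, 9, 10, 11, 12, 20, 14, 21, 16, 17, 15, 13, 6, 4, 22, 23],
-- }
--
-- def _inv(p):
--     q = [0] * len(p)
--     for i, j in enumerate(p):
--         q[j] = i
--     return q
--
-- PERMS = [("CW_" + a, CW[a]) for a in "XYZ"] + [("CCW_" + a, _inv(CW[a])) for a in "XYZ"]
--
-- def _apply(state, p):
--     return ''.join(state[i] for i in p)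
--
-- def _uniform(s):
--     return (not s) or s == s[0] * len(s)
--
-- def _is_solved(state):
--     return all(_uniform(state[i:i + 4]) for i in range(0, 24, 4))
--
-- def _solve(state, moves, depth, visited_state):
--     # Iterative DFS over an explicit LIFO stack; only the three CW permutations are
--     # stored, the CCW moves are derived as inverse permutations.
--     stack = [(state, list(moves), depth)]
--     while stack:
--         st, mv, d = stack.pop()
--         if _is_solved(st):
--             return mv
--         if d <= 0:
--             continue
--         if visited_state.get(st, -1) >= d:
--             continue
--         visited_state[st] = d
--         for name, p in reversed(PERMS):
--             stack.append((_apply(st, p), mv + [name], d - 1))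
--     return None
-- ===== Notes on version B (the rewrite author's own statement) =====
-- stated objective: alternative
-- what changed: The recursive DFS becomes an iterative DFS over an explicit LIFO stack; only the three clockwise permutation tables are stored (counter-clockwise moves are derived as inverse permutations) and face-solvedness is tested by comparing each 4-char slice with a replicated first character instead of a set cardinality.
import Mathlib
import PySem

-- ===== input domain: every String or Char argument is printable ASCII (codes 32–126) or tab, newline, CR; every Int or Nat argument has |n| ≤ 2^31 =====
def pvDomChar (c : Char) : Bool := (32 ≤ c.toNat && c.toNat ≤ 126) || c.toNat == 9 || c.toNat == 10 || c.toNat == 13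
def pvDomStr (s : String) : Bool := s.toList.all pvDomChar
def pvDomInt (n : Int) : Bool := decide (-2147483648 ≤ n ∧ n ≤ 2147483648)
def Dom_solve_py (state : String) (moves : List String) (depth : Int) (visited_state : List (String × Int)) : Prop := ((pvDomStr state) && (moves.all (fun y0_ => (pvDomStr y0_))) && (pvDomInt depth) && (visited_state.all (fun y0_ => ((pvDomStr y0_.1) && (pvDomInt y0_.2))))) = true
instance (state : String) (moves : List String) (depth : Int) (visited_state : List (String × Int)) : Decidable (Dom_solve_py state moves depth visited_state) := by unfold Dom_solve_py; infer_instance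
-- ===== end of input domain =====

-- B replaces A's recursive DFS by an iterative DFS over an explicit LIFO stack, keeps only the
-- three clockwise permutation tables (deriving the counter-clockwise moves as inverse
-- permutations) and tests face-solvedness by comparing each slice with a replicated first
-- character; equivalence is about the return value (both mutate visited_state identically up to
-- the point of return).

-- ===== PORT A =====
-- module constant MOVES of Source A
def pvMOVES : List (String × List Int) :=
  [("CW_X",  [0, 21, 2, 23, 6, 4, 7, 5, 19, 9, 17, 11, 12, 13, 14, 15, 16, 1, 18, 3, 20, 10, 22, 8]),
   ("CW_Y",  [0, 1, 14, 15, 4, 5, 2, 3, 8, 9, 6, 7, 12, 13, 10, 11, 16, 17, 18, 19, 22, 20, 23, 21]),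
   ("CW_Z",  [2, 0, 3, 1, 18, 5, 19, 7, 8, 9, 10, 11, 12, 20, 14, 21, 16, 17, 15, 13, 6, 4, 22, 23]),
   ("CCW_X", [0, 17, 2, 19, 5, 7, 4, 6, 23, 9, 21, 11, 12, 13, 14, 15, 16, 10, 18, 8, 20, 1, 22, 3]),
   ("CCW_Y", [0, 1, 6, 7, 4, 5, 10, 11, 8, 9, 14, 15, 12, 13, 2, 3, 16, 17, 18, 19, 21, 23, 20, 22]),
   ("CCW_Z", [1, 3, 0, 2, 21, 5, 20, 7, 8, 9, 10, 11, 12, 19, 14, 18, 16, 17, 4, 6, 13, 15, 22, 23])]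

-- list(MOVES.keys())
def pvKeys : List String := (PySem.Dict.mk pvMOVES).keys

-- perform_move of Source A; state[idx] is in range on every admitted input (Pre_), the .getD ' '
-- default is reached only where Python raises IndexError
def pvPerform (state : String) (move : String) : String :=
  String.ofList ((((PySem.Dict.mk pvMOVES).getD move []).map
    (fun idx => (PySem.List.pyGet? state.toList idx).getD ' ')))

-- is_solved of Source A
def pvIsSolved (state : String) : Bool :=
  (PySem.List.pyRange 0 24 4).all
    (fun i => !(decide (1 < (PySem.Set.ofList (PySem.List.slice state.toList (some i) (some (i + 4)))).length)))

-- A's `for move in list(MOVES.keys())` loop with its early return; `rec` is the recursive call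
-- into _solve at the decremented depth
def loopA (rec : String → List String → Int → PySem.Dict String Int → Option (List String) × PySem.Dict String Int) : List String → String → List String → Int → PySem.Dict String Int → Option (List String) × PySem.Dict String Int
  | [], _, _, _, v => (none, v)
  | m :: ms, st, mv, d, v =>
    let res := rec (pvPerform st m) (mv ++ [m]) (d - 1) v
    match res.1 with
    | some l => if l.isEmpty then loopA rec ms st mv d res.2 else (some l, res.2)
    | none => loopA rec ms st mv d res.2

-- A's recursion, transliterated, threading the mutated dict; the Nat fuel (depth.toNat + 1 at
-- entry) only makes it total and is never exhausted, since each recursive call decreases depth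
-- by 1 and depth ≤ 0 returns
def solveAF : Nat → String → List String → Int → PySem.Dict String Int → Option (List String) × PySem.Dict String Int
  | 0, _, _, _, v => (none, v)
  | f + 1, st, mv, d, v =>
    if pvIsSolved st then (some mv, v)
    else if d ≤ 0 then (none, v)
    else if v.getD st (-1) ≥ d then (none, v)
    else loopA (solveAF f) pvKeys st mv d (v.insert st d)

def solve_py (state : String) (moves : List String) (depth : Int) (visited_state : List (String × Int)) : Option (List String) :=
  (solveAF (depth.toNat + 1) state moves depth (PySem.Dict.mk visited_state)).1

-- ===== PORT B =====
-- Source B's CW dict: only the three clockwise tables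
def pvCW : List (String × List Int) :=
  [("X", [0, 21, 2, 23, 6, 4, 7, 5, 19, 9, 17, 11, 12, 13, 14, 15, 16, 1, 18, 3, 20, 10, 22, 8]),
   ("Y", [0, 1, 14, 15, 4, 5, 2, 3, 8, 9, 6, 7, 12, 13, 10, 11, 16, 17, 18, 19, 22, 20, 23, 21]),
   ("Z", [2, 0, 3, 1, 18, 5, 19, 7, 8, 9, 10, 11, 12, 20, 14, 21, 16, 17, 15, 13, 6, 4, 22, 23])]

-- Source B's _inv: q = [0]*len(p); for i, j in enumerate(p): q[j] = i
def pvInv (p : List Int) : List Int :=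
  (PySem.List.enumerate p 0).foldl
    (fun q ij => PySem.List.pySetD q ij.2 ij.1) (List.replicate p.length 0)

-- Source B's PERMS: CW moves from the table, CCW moves as inverse permutations
def pvPerms : List (String × List Int) :=
  (pvCW.map (fun ap => ("CW_" ++ ap.1, ap.2))) ++ (pvCW.map (fun ap => ("CCW_" ++ ap.1, pvInv ap.2)))

-- Source B's _apply; every index in the tables is a nonnegative literal < 24, so `getD i.toNat ' '`
-- is exact for Python's state[i] wherever it does not raise IndexError (excluded by Pre_)
def pvApply (st : String) (p : List Int) : String :=
  String.ofList (p.map (fun i => st.toList.getD i.toNat ' '))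

-- Source B's _uniform: (not s) or s == s[0] * len(s)
def pvUniform (s : List Char) : Bool :=
  s.isEmpty || s == List.replicate s.length (s.headD ' ')

-- Source B's _is_solved
def pvIsSolvedB (state : String) : Bool :=
  (PySem.List.pyRange 0 24 4).all
    (fun i => pvUniform (PySem.List.slice state.toList (some i) (some (i + 4))))

-- Source B's while-loop over the explicit stack (top of stack = head of list; Source B pushes the six
-- children in reversed PERMS order so they pop in PERMS order, i.e. the new stack is
-- children-in-PERMS-order ++ rest). The Nat fuel only makes the loop total and is never
-- exhausted: a popped node of depth d is replaced by six nodes of depth d - 1, so the number of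
-- iterations is below the initial 7 ^ (depth.toNat + 1).
def loopB : Nat → List (String × List String × Int) → PySem.Dict String Int → Option (List String)
  | 0, _, _ => none
  | _ + 1, [], _ => none
  | f + 1, (st, mv, d) :: rest, v =>
    if pvIsSolvedB st then some mv
    else if d ≤ 0 then loopB f rest v
    else if v.getD st (-1) ≥ d then loopB f rest v
    else loopB f (pvPerms.map (fun q => (pvApply st q.2, mv ++ [q.1], d - 1)) ++ rest) (v.insert st d)

def solve_py_alt (state : String) (moves : List String) (depth : Int) (visited_state : List (String × Int)) : Option (List String) :=
  loopB (7 ^ (depth.toNat + 1)) [(state, moves, depth)] (PySem.Dict.mk visited_state)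

-- ===== PRECONDITION & SPEC =====
-- Pre_ excludes exactly the inputs on which Python A raises IndexError: a root state shorter than
-- 24 characters that the search actually expands (not already solved, depth positive, not pruned
-- by the visited_state lookup); all deeper states have length 24, so only the root state matters.
def Pre_solve_py (state : String) (moves : List String) (depth : Int) (visited_state : List (String × Int)) : Prop :=
  24 ≤ state.toList.length ∨ pvIsSolved state = true ∨ depth ≤ 0 ∨ (PySem.Dict.mk visited_state).getD state (-1) ≥ depth
instance (state : String) (moves : List String) (depth : Int) (visited_state : List (String × Int)) : Decidable (Pre_solve_py state moves depth visited_state) := by unfold Pre_solve_py; infer_instance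

def pvWitness_solve_py : String × List String × Int × (List (String × Int)) :=
  ("", [], 0, [])

def Spec_solve_py (state : String) (moves : List String) (depth : Int) (visited_state : List (String × Int)) (out : Option (List String)) : Prop := out = solve_py_alt state moves depth visited_state
instance (state : String) (moves : List String) (depth : Int) (visited_state : List (String × Int)) (out : Option (List String)) : Decidable (Spec_solve_py state moves depth visited_state out) := by unfold Spec_solve_py; infer_instance

-- ===== CLAIM (what is proved, stated in full; the proofs are below) =====
def Claim_equal_solve_py : Prop := ∀ (state : String) (moves : List String) (depth : Int) (visited_state : List (String × Int)), Dom_solve_py state moves depth visited_state → Pre_solve_py state moves depth visited_state → Spec_solve_py state moves depth visited_state (solve_py state moves depth visited_state)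

-- ===== LEMMAS AND PROOFS =====

-- a nodup list whose elements are all equal has at most one element
theorem pv_nodup_len (l : List Char) (c : Char) (hn : l.Nodup) (h : ∀ x ∈ l, x = c) : l.length ≤ 1 := by
  match l with
  | [] => simp
  | [a] => simp
  | a :: b :: t =>
    exfalso
    have ha := h a (by simp)
    have hb := h b (by simp)
    simp [ha, hb] at hn

-- B's replicate test agrees with A's set-cardinality test on every list of characters
theorem pv_uniform_eq (s : List Char) :
    pvUniform s = !(decide (1 < (PySem.Set.ofList s).length)) := by
  cases s with
  | nil => decide
  | cons c t =>
    simp only [pvUniform, List.isEmpty_cons, Bool.false_or, List.headD_cons]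
    by_cases h : ∀ x ∈ c :: t, x = c
    · have hlen : (PySem.Set.ofList (c :: t)).length ≤ 1 :=
        pv_nodup_len _ c (PySem.Set.nodup_ofList _)
          (fun x hx => h x ((PySem.Set.mem_ofList _ _).mp hx))
      have heq : (c :: t : List Char) = List.replicate (c :: t).length c :=
        List.eq_replicate_iff.mpr ⟨rfl, h⟩
      have hb : ((c :: t : List Char) == List.replicate (c :: t).length c) = true := by
        rw [← heq]; simp
      rw [hb, decide_eq_false (by omega), Bool.not_false]
    · have hne : ((c :: t : List Char) == List.replicate (c :: t).length c) = false := by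
        rw [beq_eq_false_iff_ne]
        intro hc
        exact h (List.eq_replicate_iff.mp hc).2
      have hgt : ¬ (PySem.Set.ofList (c :: t)).length ≤ 1 := by
        intro hle
        apply h
        have hc : c ∈ PySem.Set.ofList (c :: t) := (PySem.Set.mem_ofList _ _).mpr (by simp)
        match he : PySem.Set.ofList (c :: t) with
        | [] => rw [he] at hc; simp at hc
        | [x] =>
          rw [he] at hc
          simp at hc
          subst hc
          intro y hy
          have : y ∈ PySem.Set.ofList (c :: t) := (PySem.Set.mem_ofList _ _).mpr hy
          rw [he] at this
          simpa using this
        | x :: y :: r => rw [he] at hle; simp at hle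
      rw [hne, decide_eq_true (by omega : (1:Nat) < _), Bool.not_true]

-- hence B's is_solved = A's is_solved
theorem pv_solved_eq (st : String) : pvIsSolvedB st = pvIsSolved st := by
  simp only [pvIsSolvedB, pvIsSolved, pv_uniform_eq]

-- list indexing with a nonnegative Int index, total form: B's getD = A's pyGet?-with-default
theorem pv_get_eq (l : List Char) (i : Int) (h : 0 ≤ i) :
    l.getD i.toNat ' ' = (PySem.List.pyGet? l i).getD ' ' := by
  rw [PySem.List.pyGet?_of_nonneg l h, List.getD_eq_getElem?_getD]

-- B's _apply on a table of nonnegative indices = A's perform_move on the move that owns it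
theorem pv_apply_eq (st : String) (m : String) (p : List Int)
    (h1 : (PySem.Dict.mk pvMOVES).getD m [] = p)
    (h2 : p.all (fun i => decide (0 ≤ i)) = true) :
    pvApply st p = pvPerform st m := by
  unfold pvApply pvPerform
  rw [h1]
  congr 1
  apply List.map_congr_left
  intro i hi
  exact pv_get_eq st.toList i (by simpa using (List.all_eq_true.mp h2) i hi)

-- the six children B pushes (popped in PERMS order) are exactly the six children of A's move loop
set_option maxRecDepth 8192 in
theorem pv_children_eq (st : String) (mv : List String) (d : Int) :
    pvPerms.map (fun q => (pvApply st q.2, mv ++ [q.1], d - 1)) =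
      pvKeys.map (fun m => (pvPerform st m, mv ++ [m], d - 1)) := by
  rw [show pvKeys = ["CW_X", "CW_Y", "CW_Z", "CCW_X", "CCW_Y", "CCW_Z"] from by decide]
  rw [show pvPerms =
      [("CW_X",  (PySem.Dict.mk pvMOVES).getD "CW_X" []),
       ("CW_Y",  (PySem.Dict.mk pvMOVES).getD "CW_Y" []),
       ("CW_Z",  (PySem.Dict.mk pvMOVES).getD "CW_Z" []),
       ("CCW_X", (PySem.Dict.mk pvMOVES).getD "CCW_X" []),
       ("CCW_Y", (PySem.Dict.mk pvMOVES).getD "CCW_Y" []),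
       ("CCW_Z", (PySem.Dict.mk pvMOVES).getD "CCW_Z" [])] from by decide]
  simp only [List.map_cons, List.map_nil]
  rw [pv_apply_eq st "CW_X" _ rfl (by decide), pv_apply_eq st "CW_Y" _ rfl (by decide),
      pv_apply_eq st "CW_Z" _ rfl (by decide), pv_apply_eq st "CCW_X" _ rfl (by decide),
      pv_apply_eq st "CCW_Y" _ rfl (by decide), pv_apply_eq st "CCW_Z" _ rfl (by decide)]

-- measure of a stack node: an upper bound (by a margin of 1) on the number of loop iterations
-- its subtree can cost
def pvMu (n : String × List String × Int) : Nat := 7 ^ n.2.2.toNat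

-- the children of an expanded node contribute (number of children) · 7^(d-1).toNat to the measure
theorem pv_sum_children {α : Type} (f : α → String) (g : α → List String) (d : Int) (qs : List α) :
    ((qs.map (fun q => (f q, g q, d - 1))).map pvMu).sum = qs.length * 7 ^ (d - 1).toNat := by
  induction qs with
  | nil => simp
  | cons a as iha =>
    simp only [List.map_cons, List.sum_cons, List.length_cons]
    rw [iha]
    show 7 ^ (d - 1).toNat + _ = _
    ring

-- expanding a node strictly decreases the stack measure
theorem pv_mu_expand (st : String) (mv : List String) (d : Int) (rest : List (String × List String × Int)) (hd : ¬ d ≤ 0) :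
    (((pvPerms.map (fun q => (pvApply st q.2, mv ++ [q.1], d - 1))) ++ rest).map pvMu).sum + 1 ≤ 7 ^ d.toNat + ((rest.map pvMu).sum) := by
  have hdt : d.toNat = (d - 1).toNat + 1 := by omega
  have h0 : 0 < 7 ^ (d - 1).toNat := Nat.pow_pos (by norm_num)
  have hlen : pvPerms.length = 6 := by decide
  simp only [List.map_append, List.sum_append, pv_sum_children, hlen]
  rw [hdt, pow_succ]
  omega

-- the stack loop does not depend on the fuel, as long as the fuel exceeds the stack measure
theorem loopB_irrel : ∀ (n : Nat) (stack : List (String × List String × Int)) (v : PySem.Dict String Int) (f g : Nat),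
    (stack.map pvMu).sum ≤ n → n < f → n < g → loopB f stack v = loopB g stack v := by
  intro n
  induction n using Nat.strong_induction_on with
  | _ n ih =>
    intro stack v f g hs hf hg
    rcases f with _ | f; · omega
    rcases g with _ | g; · omega
    rcases stack with _ | ⟨⟨st, mv, d⟩, rest⟩
    · rfl
    · simp only [List.map_cons, List.sum_cons] at hs
      have hmu : pvMu (st, mv, d) = 7 ^ d.toNat := rfl
      rw [hmu] at hs
      have h0 : 0 < 7 ^ d.toNat := Nat.pow_pos (by norm_num)
      show loopB (f + 1) ((st, mv, d) :: rest) v = loopB (g + 1) ((st, mv, d) :: rest) v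
      rw [loopB, loopB]
      by_cases h1 : pvIsSolvedB st
      · simp [h1]
      · simp only [h1]
        by_cases h2 : d ≤ 0
        · simp only [h2, if_true]
          exact ih (n - 1) (by omega) rest v f g (by omega) (by omega) (by omega)
        · simp only [h2, if_false]
          by_cases h3 : v.getD st (-1) ≥ d
          · simp only [h3, if_true]
            exact ih (n - 1) (by omega) rest v f g (by omega) (by omega) (by omega)
          · simp only [h3, if_false]
            have hexp := pv_mu_expand st mv d rest h2
            exact ih (n - 1) (by omega) _ (v.insert st d) f g (by omega) (by omega) (by omega)

-- Any `some` result of A's recursion extends the moves passed in (so results bubbled out of the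
-- move loop are never the empty list and Python's truthiness test never discards them).
theorem solveAF_prefix : ∀ (f : Nat), ∀ (st : String) (mv : List String) (d : Int) (v : PySem.Dict String Int) (l : List String) (v' : PySem.Dict String Int), solveAF f st mv d v = (some l, v') → mv <+: l := by
  intro f
  induction f with
  | zero => intro st mv d v l v' h; simp [solveAF] at h
  | succ f ih =>
    have hloop : ∀ (ms : List String) (st : String) (mv : List String) (d : Int) (v : PySem.Dict String Int) (l : List String) (v' : PySem.Dict String Int), loopA (solveAF f) ms st mv d v = (some l, v') → mv <+: l := by
      intro ms
      induction ms with
      | nil => intro st mv d v l v' h; simp [loopA] at h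
      | cons m ms ihm =>
        intro st mv d v l v' h
        simp only [loopA] at h
        rcases hres : (solveAF f (pvPerform st m) (mv ++ [m]) (d - 1) v) with ⟨r, v2⟩
        rw [hres] at h
        cases r with
        | none => exact ihm st mv d v2 l v' h
        | some l0 =>
          by_cases he : l0.isEmpty
          · simp only [he, if_true] at h
            exact ihm st mv d v2 l v' h
          · simp only [he] at h
            have hl : l0 = l := by simpa using congrArg Prod.fst h
            subst hl
            exact (List.prefix_append mv [m]).trans (ih _ _ _ _ _ _ hres)
    intro st mv d v l v' h
    simp only [solveAF] at h
    by_cases h1 : pvIsSolved st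
    · simp only [h1, if_true] at h
      have hl : mv = l := by simpa using congrArg Prod.fst h
      subst hl
      exact List.prefix_refl _
    · simp only [h1] at h
      by_cases h2 : d ≤ 0
      · simp [h2] at h
      · simp only [h2] at h
        by_cases h3 : v.getD st (-1) ≥ d
        · simp [h3] at h
        · simp only [h3] at h
          exact hloop pvKeys st mv d (v.insert st d) l v' h

-- The stack machine run on (node :: rest) behaves as: fully solve node recursively (A's
-- function at its exact fuel), return its `some` result, otherwise continue with rest under
-- the updated dictionary (at any sufficient fuel).
theorem loopB_sim : ∀ (n : Nat) (st : String) (mv : List String) (d : Int) (v : PySem.Dict String Int) (rest : List (String × List String × Int)) (f g : Nat),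
    7 ^ d.toNat + ((rest.map pvMu).sum) ≤ n → n < f → ((rest.map pvMu).sum) < g →
    loopB f ((st, mv, d) :: rest) v =
      (match solveAF (d.toNat + 1) st mv d v with
       | (some l, _) => some l
       | (none, v') => loopB g rest v') := by
  intro n
  induction n using Nat.strong_induction_on with
  | _ n ih =>
    intro st mv d v rest f g hn hf hg
    rcases f with _ | f; · omega
    have h0 : 0 < 7 ^ d.toNat := Nat.pow_pos (by norm_num)
    rw [loopB, pv_solved_eq st]
    by_cases h1 : pvIsSolved st
    · simp [solveAF, h1]
    · by_cases h2 : d ≤ 0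
      · simp only [h1, h2, if_true]
        rw [show solveAF (d.toNat + 1) st mv d v = (none, v) by simp [solveAF, h1, h2]]
        exact loopB_irrel ((rest.map pvMu).sum) rest v f g (by omega) (by omega) (by omega)
      · by_cases h3 : v.getD st (-1) ≥ d
        · simp only [h1, if_false, h2, if_false, h3, if_true]
          rw [show solveAF (d.toNat + 1) st mv d v = (none, v) by simp [solveAF, h1, h2, h3]]
          exact loopB_irrel ((rest.map pvMu).sum) rest v f g (by omega) (by omega) (by omega)
        · simp only [h1, h2, h3, if_false]
          rw [pv_children_eq st mv d]
          have hdt : d.toNat = (d - 1).toNat + 1 := by omega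
          have hp0 : 0 < 7 ^ (d - 1).toNat := Nat.pow_pos (by norm_num)
          have hpow : 7 ^ d.toNat = 7 ^ (d - 1).toNat * 7 := by rw [hdt, pow_succ]
          -- inner induction over the remaining moves of the expansion
          have key : ∀ (ms : List String), ms.length ≤ 6 → ∀ (v1 : PySem.Dict String Int),
              loopB f (ms.map (fun m => (pvPerform st m, mv ++ [m], d - 1)) ++ rest) v1 =
                (match loopA (solveAF d.toNat) ms st mv d v1 with
                 | (some l, _) => some l
                 | (none, v'') => loopB g rest v'') := by
            intro ms
            induction ms with
            | nil =>
              intro _ v1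
              simp only [List.map_nil, List.nil_append, loopA]
              exact loopB_irrel ((rest.map pvMu).sum) rest v1 f g (by omega) (by omega) (by omega)
            | cons m ms ihm =>
              intro hlen v1
              have hlen5 : ms.length ≤ 5 := by simp at hlen; omega
              simp only [List.map_cons, List.cons_append]
              have hsum : ((ms.map (fun m => (pvPerform st m, mv ++ [m], d - 1))).map pvMu).sum = ms.length * 7 ^ (d - 1).toNat := pv_sum_children _ _ d ms
              have hle : ms.length * 7 ^ (d - 1).toNat ≤ 5 * 7 ^ (d - 1).toNat := Nat.mul_le_mul_right _ hlen5
              have hmeas : 7 ^ (d - 1).toNat + (((ms.map (fun m => (pvPerform st m, mv ++ [m], d - 1))) ++ rest).map pvMu).sum ≤ n - 1 := by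
                simp only [List.map_append, List.sum_append, hsum]
                omega
              have hstep := ih (n - 1) (by omega)
                (pvPerform st m) (mv ++ [m]) (d - 1) v1 (ms.map (fun m => (pvPerform st m, mv ++ [m], d - 1)) ++ rest) f f hmeas (by omega)
                (by simp only [List.map_append, List.sum_append, hsum]; omega)
              rw [hstep]
              rw [show loopA (solveAF d.toNat) (m :: ms) st mv d v1 =
                    (let res := solveAF d.toNat (pvPerform st m) (mv ++ [m]) (d - 1) v1
                     match res.1 with
                     | some l => if l.isEmpty then loopA (solveAF d.toNat) ms st mv d res.2 else (some l, res.2)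
                     | none => loopA (solveAF d.toNat) ms st mv d res.2) from rfl]
              rcases hres : (solveAF ((d - 1).toNat + 1) (pvPerform st m) (mv ++ [m]) (d - 1) v1) with ⟨r, v2⟩
              have hres' : solveAF d.toNat (pvPerform st m) (mv ++ [m]) (d - 1) v1 = (r, v2) := by rw [hdt]; exact hres
              rw [hres']
              cases r with
              | none => exact ihm (by omega) v2
              | some l0 =>
                have hne : l0 ≠ [] := by
                  have := solveAF_prefix _ _ _ _ _ _ _ hres
                  intro hc; rw [hc] at this
                  simp at this
                simp [List.isEmpty_iff, hne]
          rw [key pvKeys (by decide) (v.insert st d)]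
          rw [show solveAF (d.toNat + 1) st mv d v = loopA (solveAF d.toNat) pvKeys st mv d (v.insert st d) by
            simp only [solveAF]
            simp [h1, h2, h3]]
          simp

-- ===== VERDICT (by name: the statement is the Claim_ definition above) =====
theorem solve_py_spec : Claim_equal_solve_py := by
  intro state moves depth visited_state _ _
  unfold Spec_solve_py solve_py solve_py_alt
  rw [loopB_sim (7 ^ depth.toNat) state moves depth (PySem.Dict.mk visited_state) [] (7 ^ (depth.toNat + 1)) 1 (by simp)
      (by have := Nat.pow_lt_pow_succ (a := 7) (n := depth.toNat) (by norm_num); omega) (by simp)]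
  rcases h : solveAF (depth.toNat + 1) state moves depth (PySem.Dict.mk visited_state) with ⟨r, v'⟩
  cases r <;> simp [loopB]
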